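-- pv_equiv track=rewrite | github.com/mohammadfaiizan/ProjectI | DSA/Theory/Bit_Manipulation/004_bit_bitmasking_subsets.py | generate_k_size_subsets
-- ===== SOURCE A (Python) =====
-- def generate_k_size_subsets(nums: list, k: int) -> list:
--     """
--     Generate all subsets of size k.
--
--     Args:
--         nums: Input array
--         k: Size of subsets
--
--     Returns:
--         List of k-size subsets
--
--     Time: O(C(n,k) * k), Space: O(C(n,k) * k)
--     """
--     n = len(nums)
--     k_subsets = []
--
--     # Generate all masks with exactly k bits set
--     for mask in range(1 << n):
--         if bin(mask).count('1') == k:  # Check if exactly k bits are set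
--             subset = []
--
--             for i in range(n):
--                 if mask & (1 << i):
--                     subset.append(nums[i])
--
--             k_subsets.append(subset)
--
--     return k_subsets
-- ===== SOURCE B (Python) =====
-- def generate_k_size_subsets(nums: list, k: int) -> list:
--     """
--     Generate all subsets of size k, recursively (include/exclude the last
--     element), in the same ascending-mask (colexicographic) order as the
--     bitmask enumeration.
--     """
--     if k == 0:
--         return [[]]
--     if k < 0 or k > len(nums):
--         return []
--     rest = nums[:-1]
--     result = generate_k_size_subsets(rest, k)
--     for s in generate_k_size_subsets(rest, k - 1):
--         result.append(s + [nums[-1]])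
--     return result
-- ===== Notes on version B (the rewrite author's own statement) =====
-- stated objective: alternative
-- what changed: Replaced the exhaustive scan of all 2^n bitmasks (filtering for popcount k and rebuilding each subset by an inner index scan) with an include/exclude recursion on the last element that emits the same subsets in the same colexicographic order and does no work outside the C(n,k) subsets actually produced.
import Mathlib
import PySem

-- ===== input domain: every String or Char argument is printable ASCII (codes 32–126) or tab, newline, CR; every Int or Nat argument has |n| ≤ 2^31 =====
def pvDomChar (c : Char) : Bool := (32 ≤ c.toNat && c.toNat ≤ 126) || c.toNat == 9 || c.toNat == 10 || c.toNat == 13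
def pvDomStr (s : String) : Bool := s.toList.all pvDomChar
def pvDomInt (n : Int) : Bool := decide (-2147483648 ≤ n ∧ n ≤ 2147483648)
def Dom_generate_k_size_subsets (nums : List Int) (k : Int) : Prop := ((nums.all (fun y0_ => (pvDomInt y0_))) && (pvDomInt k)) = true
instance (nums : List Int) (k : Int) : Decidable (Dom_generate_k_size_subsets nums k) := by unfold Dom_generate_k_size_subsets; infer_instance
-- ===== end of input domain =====

-- B replaces A's enumeration of all 2^n bitmasks by an include/exclude
-- recursion on the last element that emits the same subsets in the same
-- (colexicographic) order; objective: alternative decomposition.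

-- ===== PORT A =====
-- bin(mask).count('1') for a nonnegative mask: Python's bin() writes exactly
-- the binary digits of the (nonnegative) mask, so counting '1' characters is
-- the number of set bits; this helper is exact on that domain.
def pyPopcount : Nat → Nat
  | 0 => 0
  | m + 1 => ((m + 1) % 2) + pyPopcount ((m + 1) / 2)
decreasing_by omega

-- literal port of A: for mask in range(1 << n): if popcount(mask) == k, scan
-- i in range(n) and append nums[i] when bit i is set.  nums[i] is ported as
-- nums.getD i 0: i comes from range(n) so it is always in range and the
-- default is never used.
def generate_k_size_subsets (nums : List Int) (k : Int) : List (List Int) :=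
  (List.range (1 <<< nums.length)).foldl (fun acc mask =>
    if (pyPopcount mask : Int) = k then
      acc ++ [(List.range nums.length).foldl (fun s i =>
        if mask &&& (1 <<< i) ≠ 0 then s ++ [nums.getD i 0] else s) []]
    else acc) []

-- ===== PORT B =====
-- literal port of B (Source B): include/exclude recursion on the last element.
def generate_k_size_subsets_alt (nums : List Int) (k : Int) : List (List Int) :=
  if _hk : k = 0 then [[]]
  else if _hb : k < 0 ∨ (nums.length : Int) < k then []
  else
    generate_k_size_subsets_alt nums.dropLast k ++
      (generate_k_size_subsets_alt nums.dropLast (k - 1)).map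
        (fun s => s ++ [(PySem.List.pyGet? nums (-1)).getD 0])
termination_by nums.length
decreasing_by
  all_goals simp only [List.length_dropLast]; omega

-- ===== PRECONDITION & SPEC =====
def Spec_generate_k_size_subsets (nums : List Int) (k : Int) (out : List (List Int)) : Prop := out = generate_k_size_subsets_alt nums k
instance (nums : List Int) (k : Int) (out : List (List Int)) : Decidable (Spec_generate_k_size_subsets nums k out) := by unfold Spec_generate_k_size_subsets; infer_instance

-- ===== CLAIM (what is proved, stated in full; the proofs are below) =====
def Claim_equal_generate_k_size_subsets : Prop := ∀ (nums : List Int) (k : Int), Dom_generate_k_size_subsets nums k → Spec_generate_k_size_subsets nums k (generate_k_size_subsets nums k)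

-- ===== LEMMAS AND PROOFS =====

-- A as filter/map: masks with k set bits, each mapped to its index-selected subset
theorem A_char (nums : List Int) (k : Int) :
    generate_k_size_subsets nums k =
      ((List.range (2 ^ nums.length)).filter
          (fun m => decide ((pyPopcount m : Int) = k))).map
        (fun mask =>
          ((List.range nums.length).filter
              (fun i => decide (mask &&& (2 ^ i) ≠ 0))).map
            (fun i => nums.getD i 0)) := by
  unfold generate_k_size_subsets
  simp only [Nat.one_shiftLeft, PySem.List.foldl_append_ite, List.nil_append]

theorem popcount_step (m : Nat) : pyPopcount m = m % 2 + pyPopcount (m / 2) := by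
  cases m with
  | zero => simp [pyPopcount]
  | succ m => rw [pyPopcount]

theorem popcount_add_pow (L m : Nat) (h : m < 2 ^ L) :
    pyPopcount (2 ^ L + m) = pyPopcount m + 1 := by
  induction L generalizing m with
  | zero =>
    have : m = 0 := by omega
    subst this
    norm_num
    rw [popcount_step 1]
    simp [pyPopcount]
  | succ L ih =>
    have e : 2 ^ (L + 1) = 2 ^ L * 2 := pow_succ 2 L
    rw [popcount_step (2 ^ (L + 1) + m), popcount_step m]
    have h1 : (2 ^ (L + 1) + m) % 2 = m % 2 := by rw [e]; omega
    have h2 : (2 ^ (L + 1) + m) / 2 = 2 ^ L + m / 2 := by rw [e]; omega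
    rw [h1, h2, ih (m / 2) (by rw [e] at h; omega)]
    omega

theorem and_pow_ne (mask i : Nat) : (mask &&& 2 ^ i ≠ 0) ↔ mask.testBit i = true := by
  rw [Nat.and_two_pow]
  cases h : mask.testBit i <;> simp

-- the split lemma for A: last element = highest bit, masks ascending
theorem A_concat (l : List Int) (x : Int) (k : Int) :
    generate_k_size_subsets (l ++ [x]) k =
      generate_k_size_subsets l k ++
        (generate_k_size_subsets l (k - 1)).map (fun s => s ++ [x]) := by
  rw [A_char, A_char, A_char]
  have hlen : (l ++ [x]).length = l.length + 1 := by simp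
  have router : List.range (2 ^ (l.length + 1)) =
      List.range (2 ^ l.length) ++
        (List.range (2 ^ l.length)).map (2 ^ l.length + ·) := by
    rw [show (2 : Nat) ^ (l.length + 1) = 2 ^ l.length + 2 ^ l.length by rw [pow_succ]; ring,
      List.range_add]
  rw [hlen, router, List.filter_append, List.map_append]
  congr 1
  · -- low half: masks < 2^L have bit L clear, so the subset ignores x
    apply List.map_congr_left
    intro mask hmask
    have hm : mask < 2 ^ l.length :=
      List.mem_range.mp (List.mem_filter.mp hmask).1
    rw [List.range_succ, List.filter_append, List.map_append]
    have hbitL : ¬ (mask &&& 2 ^ l.length ≠ 0) := by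
      rw [and_pow_ne]
      simp [Nat.testBit_lt_two_pow hm]
    rw [show List.filter (fun i => decide (mask &&& 2 ^ i ≠ 0)) [l.length] = [] by
      simp [List.filter, hbitL]]
    simp only [List.map_nil, List.append_nil]
    apply List.map_congr_left
    intro i hi
    have hil : i < l.length := List.mem_range.mp (List.mem_of_mem_filter hi)
    simp [List.getD, List.getElem?_append_left hil]
  · -- high half: masks 2^L + m have bit L set and agree with m below bit L
    rw [List.filter_map, List.map_map, List.map_map]
    rw [show List.filter ((fun m => decide ((pyPopcount m : Int) = k)) ∘
          (2 ^ l.length + ·)) (List.range (2 ^ l.length)) =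
        List.filter (fun m => decide ((pyPopcount m : Int) = k - 1))
          (List.range (2 ^ l.length)) from by
      apply List.filter_congr
      intro m hm
      simp only [Function.comp, popcount_add_pow l.length m (List.mem_range.mp hm),
        decide_eq_decide]
      push_cast
      omega]
    apply List.map_congr_left
    intro m hm
    have hmlt : m < 2 ^ l.length :=
      List.mem_range.mp (List.mem_of_mem_filter hm)
    simp only [Function.comp]
    rw [List.range_succ, List.filter_append]
    have hbitL : ((2 ^ l.length + m) &&& 2 ^ l.length ≠ 0) := by
      rw [and_pow_ne, Nat.testBit_two_pow_add_eq,
        Nat.testBit_lt_two_pow hmlt]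
      rfl
    rw [show List.filter (fun i => decide ((2 ^ l.length + m) &&& 2 ^ i ≠ 0))
        [l.length] = [l.length] from by simp [List.filter, hbitL]]
    rw [List.map_append,
      show List.filter (fun i => decide ((2 ^ l.length + m) &&& 2 ^ i ≠ 0))
          (List.range l.length) =
        List.filter (fun i => decide (m &&& 2 ^ i ≠ 0)) (List.range l.length) from by
      apply List.filter_congr
      intro i hi
      have hil : i < l.length := List.mem_range.mp hi
      simp only [and_pow_ne,
        Nat.testBit_two_pow_add_gt hil]]
    congr 1
    · apply List.map_congr_left
      intro i hi
      have hil : i < l.length := List.mem_range.mp (List.mem_of_mem_filter hi)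
      simp [List.getD, List.getElem?_append_left hil]
    · simp [List.getD]

-- one-step unfolding of B's port, with plain ifs
theorem alt_unfold (nums : List Int) (k : Int) :
    generate_k_size_subsets_alt nums k =
      if k = 0 then [[]]
      else if k < 0 ∨ (nums.length : Int) < k then []
      else
        generate_k_size_subsets_alt nums.dropLast k ++
          (generate_k_size_subsets_alt nums.dropLast (k - 1)).map
            (fun s => s ++ [(PySem.List.pyGet? nums (-1)).getD 0]) := by
  rw [generate_k_size_subsets_alt]
  simp only [dite_eq_ite]

theorem alt_out (nums : List Int) (k : Int)
    (h : k < 0 ∨ (nums.length : Int) < k) :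
    generate_k_size_subsets_alt nums k = [] := by
  rw [alt_unfold, if_neg (by omega), if_pos h]

theorem A_eq_alt (nums : List Int) (k : Int) :
    generate_k_size_subsets nums k = generate_k_size_subsets_alt nums k := by
  induction nums using List.reverseRecOn generalizing k with
  | nil =>
    by_cases hk : k = 0
    · subst hk
      rw [alt_unfold, if_pos rfl, A_char]
      simp [pyPopcount]
    · rw [alt_out [] k (by simp only [List.length_nil, Nat.cast_zero]; omega), A_char]
      have h0 : pyPopcount 0 = 0 := by rw [pyPopcount]
      simp [h0, Ne.symm hk]
  | append_singleton l x ih =>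
    rw [A_concat, ih, ih, alt_unfold (l ++ [x]) k]
    by_cases hk : k = 0
    · subst hk
      rw [if_pos rfl, alt_unfold l 0, if_pos rfl,
        alt_out l ((0:Int) - 1) (by left; omega)]
      simp
    · rw [if_neg hk]
      by_cases hb : k < 0 ∨ ((l ++ [x]).length : Int) < k
      · have hL : (l.length : Int) + 1 < k ∨ k < 0 := by
          rcases hb with h | h
          · right; exact h
          · left; simpa using h
        rw [if_pos hb, alt_out l k (by omega), alt_out l (k - 1) (by omega)]
        simp
      · rw [if_neg hb, List.dropLast_concat,
          PySem.List.pyGet?_neg_one_append_singleton]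
        rfl

-- ===== VERDICT (by name: the statement is the Claim_ definition above) =====
theorem generate_k_size_subsets_spec : Claim_equal_generate_k_size_subsets := by
  intro nums k _
  exact A_eq_alt nums k
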